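-- pv_equiv track=rewrite | github.com/ssg-js/Course | 01_python/lecture/0726/0726_practice.py | low_and_up
-- ===== SOURCE A (Python) =====
-- def low_and_up(word):
--     changed = ''
--     num = 1
--     for digit in word:
--         if (num % 2 == 1) and (digit.isupper()):
--             # 홀수번째 문자가 대문자인 경우
--             changed += chr(ord(digit) + (ord('a') - ord('A')))
--         elif (num % 2 == 0) and (digit.islower()):
--             # 짝수번째 문자가 소문자인 경우
--             changed += chr(ord(digit) + (ord('A') - ord('a')))
--         else:  # 바꾸지 않아도 되는 경우
--             changed += digit
--         num += 1
--     return changed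
-- ===== SOURCE B (Python) =====
-- def low_and_up(word):
--     out = []
--     it = iter(word)
--     for a in it:
--         out.append(chr(ord(a) + 32) if a.isupper() else a)
--         b = next(it, None)
--         if b is None:
--             break
--         out.append(chr(ord(b) - 32) if b.islower() else b)
--     return ''.join(out)
-- ===== Notes on version B (the rewrite author's own statement) =====
-- stated objective: alternative
-- what changed: B consumes the string two characters at a time (pair recursion, no position counter or parity test), appending to a list joined once at the end, instead of A's single loop with a running counter, per-character parity check and repeated string concatenation.
import Mathlib
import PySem

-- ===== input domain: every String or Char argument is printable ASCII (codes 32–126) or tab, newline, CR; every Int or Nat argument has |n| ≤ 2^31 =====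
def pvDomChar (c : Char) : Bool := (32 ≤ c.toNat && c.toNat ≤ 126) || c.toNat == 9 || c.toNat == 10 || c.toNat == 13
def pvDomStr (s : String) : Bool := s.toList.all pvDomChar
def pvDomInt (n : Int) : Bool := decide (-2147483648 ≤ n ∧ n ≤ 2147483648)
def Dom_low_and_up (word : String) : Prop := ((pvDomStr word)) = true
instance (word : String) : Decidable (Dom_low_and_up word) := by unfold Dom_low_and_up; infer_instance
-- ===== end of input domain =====

-- B changes the decomposition: pair-at-a-time recursion instead of a counter with a parity test; equivalence of return values is proved for all inputs.

-- ===== PORT A =====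
-- one loop step of A: parity of the running counter decides the transform
def pvStepA (st : List Char × Int) (c : Char) : List Char × Int :=
  if PySem.Int.mod st.2 2 = 1 ∧ PySem.Chars.isupper c then
    (st.1 ++ [Char.ofNat (c.toNat + 32)], st.2 + 1)
  else if PySem.Int.mod st.2 2 = 0 ∧ PySem.Chars.islower c then
    (st.1 ++ [Char.ofNat (c.toNat - 32)], st.2 + 1)
  else
    (st.1 ++ [c], st.2 + 1)

def low_and_up (word : String) : String :=
  String.ofList (word.toList.foldl pvStepA ([], 1)).1

-- ===== PORT B =====
def pvLowT (c : Char) : Char :=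
  if PySem.Chars.isupper c then Char.ofNat (c.toNat + 32) else c

def pvUpT (c : Char) : Char :=
  if PySem.Chars.islower c then Char.ofNat (c.toNat - 32) else c

-- B's pairwise consumption of the character stream
def pvPairGo : List Char → List Char
  | [] => []
  | [a] => [pvLowT a]
  | a :: b :: rest => pvLowT a :: pvUpT b :: pvPairGo rest

def low_and_up_alt (word : String) : String :=
  String.ofList (pvPairGo word.toList)

-- ===== PRECONDITION & SPEC =====
def Spec_low_and_up (word : String) (out : String) : Prop := out = low_and_up_alt word
instance (word : String) (out : String) : Decidable (Spec_low_and_up word out) := by unfold Spec_low_and_up; infer_instance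

-- ===== CLAIM (what is proved, stated in full; the proofs are below) =====
def Claim_equal_low_and_up : Prop := ∀ (word : String), Dom_low_and_up word → Spec_low_and_up word (low_and_up word)

-- ===== LEMMAS AND PROOFS =====

lemma pvStepA_odd (acc : List Char) (n : Int) (c : Char) (h : PySem.Int.mod n 2 = 1) :
    pvStepA (acc, n) c = (acc ++ [pvLowT c], n + 1) := by
  have h0 : PySem.Int.mod n 2 ≠ 0 := by rw [h]; decide
  unfold pvStepA pvLowT
  by_cases hu : PySem.Chars.isupper c
  · rw [if_pos ⟨h, hu⟩, if_pos hu]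
  · rw [if_neg (fun hc => hu hc.2), if_neg (fun hc => h0 hc.1), if_neg hu]

lemma pvStepA_even (acc : List Char) (n : Int) (c : Char) (h : PySem.Int.mod n 2 = 0) :
    pvStepA (acc, n) c = (acc ++ [pvUpT c], n + 1) := by
  have h1 : PySem.Int.mod n 2 ≠ 1 := by rw [h]; decide
  unfold pvStepA pvUpT
  by_cases hl : PySem.Chars.islower c
  · rw [if_neg (fun hc => h1 hc.1), if_pos ⟨h, hl⟩, if_pos hl]
  · rw [if_neg (fun hc => h1 hc.1), if_neg (fun hc => hl hc.2), if_neg hl]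

lemma pvMod_succ_of_odd (n : Int) (h : PySem.Int.mod n 2 = 1) : PySem.Int.mod (n + 1) 2 = 0 := by
  rw [PySem.Int.mod_eq_emod_of_pos (by omega)] at h ⊢; omega

lemma pvMod_succ2_of_odd (n : Int) (h : PySem.Int.mod n 2 = 1) : PySem.Int.mod (n + 1 + 1) 2 = 1 := by
  rw [PySem.Int.mod_eq_emod_of_pos (by omega)] at h ⊢; omega

lemma pvFoldl_eq_pairGo (cs : List Char) :
    ∀ (acc : List Char) (n : Int), PySem.Int.mod n 2 = 1 →
      (cs.foldl pvStepA (acc, n)).1 = acc ++ pvPairGo cs := by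
  induction cs using pvPairGo.induct with
  | case1 => intro acc n _; simp [pvPairGo]
  | case2 a =>
      intro acc n h
      simp [List.foldl, pvStepA_odd acc n a h, pvPairGo]
  | case3 a b rest ih =>
      intro acc n h
      have h1 := pvMod_succ_of_odd n h
      have h2 := pvMod_succ2_of_odd n h
      simp only [List.foldl, pvStepA_odd acc n a h, pvStepA_even _ _ b h1]
      rw [ih _ _ h2]
      simp [pvPairGo]

-- ===== VERDICT (by name: the statement is the Claim_ definition above) =====
theorem low_and_up_spec : Claim_equal_low_and_up := by
  intro word _
  unfold Spec_low_and_up low_and_up low_and_up_alt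
  rw [pvFoldl_eq_pairGo word.toList [] 1 (by decide)]
  rfl
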